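-- pv_equiv track=rewrite | github.com/vezyldicode/The_Impossible_Key | assets/quizzes/Rules_Dictionary.py | check_repeating_pattern
-- ===== SOURCE A (Python) =====
-- def check_repeating_pattern(password):
--     """Phải có một mẫu chữ cái lặp lại ít nhất 2 lần"""
--     letters = ''.join(c for c in password if c.isalpha()).lower()
--     for length in range(2, len(letters)//2 + 1):
--         for i in range(len(letters) - length):
--             pattern = letters[i:i+length]
--             if letters.count(pattern) >= 2:
--                 return True
--     return False
-- ===== SOURCE B (Python) =====
-- def check_repeating_pattern(password):
--     """Phải có một mẫu chữ cái lặp lại ít nhất 2 lần"""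
--     # A repeated letter pattern of length >= 2 exists iff some two-letter block
--     # repeats at non-overlapping positions: stream the letters once, keeping the
--     # previous letter, the two most recent bigrams and a set of older bigrams.
--     seen = set()
--     prev = None    # last letter seen
--     p1 = None      # most recent bigram
--     p2 = None      # bigram before that
--     for c in password:
--         if not c.isalpha():
--             continue
--         c = c.lower()
--         if prev is not None:
--             cur = (prev, c)
--             if p2 is not None:
--                 seen.add(p2)
--                 if cur in seen:
--                     return True
--             p2, p1 = p1, cur
--         prev = c
--     return False
-- ===== Notes on version B (the rewrite author's own statement) =====
-- stated objective: faster
-- what changed: A scans every pattern length and start position and calls str.count on each candidate substring (about O(n^4) in the worst case); B uses the fact that a letter pattern of length >= 2 repeats non-overlapping iff some bigram repeats with gap >= 2, and detects that in a single streaming pass over the characters with a set of earlier bigrams, returning as soon as a repeat is seen and never materialising the letters string.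
import Mathlib
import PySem

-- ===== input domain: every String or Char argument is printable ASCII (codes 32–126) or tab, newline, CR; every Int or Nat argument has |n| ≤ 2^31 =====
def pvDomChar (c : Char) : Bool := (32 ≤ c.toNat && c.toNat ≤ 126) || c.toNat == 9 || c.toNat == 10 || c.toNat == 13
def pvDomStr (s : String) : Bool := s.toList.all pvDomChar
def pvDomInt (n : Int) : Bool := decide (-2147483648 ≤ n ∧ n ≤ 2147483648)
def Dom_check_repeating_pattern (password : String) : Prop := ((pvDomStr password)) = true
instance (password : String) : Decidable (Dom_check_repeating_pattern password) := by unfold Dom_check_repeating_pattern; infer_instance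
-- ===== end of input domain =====

-- B replaces A's O(n^4) scan over all pattern lengths with one linear pass over letter
-- bigrams (a repeated pattern of length >= 2 exists iff some bigram repeats with gap >= 2).

-- ===== PORT A =====
def check_repeating_pattern (password : String) : Bool :=
  let letters := PySem.Chars.lower (password.toList.filter (fun c => PySem.Chars.isalpha c))
  (PySem.List.pyRange 2 (PySem.Int.floordiv (PySem.List.len letters) 2 + 1) 1).any (fun length =>
    (PySem.List.pyRange 0 (PySem.List.len letters - length) 1).any (fun i =>
      let pattern := PySem.Chars.slice letters (some i) (some (i + length))
      decide (2 ≤ PySem.Chars.count letters pattern)))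

-- ===== PORT B =====
-- the streaming loop 'for c in password: …' with state (seen, prev, p2, p1) and early return
def pvScan (seen : PySem.Set (Char × Char)) (prev : Option Char)
    (p2 p1 : Option (Char × Char)) : List Char → Bool
  | [] => false
  | c :: rest =>
    if PySem.Chars.isalpha c then
      let c' := PySem.Chars.lowerChar c
      match prev with
      | some b =>
        let cur := (b, c')
        (match p2 with
         | some bg =>
           let seen' := PySem.Set.add seen bg
           if PySem.Set.contains seen' cur then true
           else pvScan seen' (some c') p1 (some cur) rest
         | none => pvScan seen (some c') p1 (some cur) rest)
      | none => pvScan seen (some c') p2 p1 rest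
    else pvScan seen prev p2 p1 rest

def check_repeating_pattern_alt (password : String) : Bool :=
  pvScan PySem.Set.empty none none none password.toList

-- ===== PRECONDITION & SPEC =====
def Spec_check_repeating_pattern (password : String) (out : Bool) : Prop := out = check_repeating_pattern_alt password
instance (password : String) (out : Bool) : Decidable (Spec_check_repeating_pattern password out) := by unfold Spec_check_repeating_pattern; infer_instance

-- ===== CLAIM (what is proved, stated in full; the proofs are below) =====
def Claim_equal_check_repeating_pattern : Prop := ∀ (password : String), Dom_check_repeating_pattern password → Spec_check_repeating_pattern password (check_repeating_pattern password)

-- ===== LEMMAS AND PROOFS =====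

-- Both programs detect: some two-letter block repeats at non-overlapping positions.
def pvRep (L : List Char) : Prop :=
  ∃ p q : Nat, p + 2 ≤ q ∧ q + 2 ≤ L.length ∧ (L.drop p).take 2 = (L.drop q).take 2

-- unfolding equations for PySem.Chars.count.go
theorem pvGo_zero (sub l : List Char) (acc : Nat) : PySem.Chars.count.go sub 0 l acc = acc := by
  cases l <;> rfl

theorem pvGo_nil (sub : List Char) (fuel acc : Nat) : PySem.Chars.count.go sub fuel [] acc = acc := by
  cases fuel <;> rfl

theorem pvGo_succ_cons (sub : List Char) (fuel acc : Nat) (c : Char) (t : List Char) :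
    PySem.Chars.count.go sub (fuel+1) (c::t) acc =
      if sub.isPrefixOf (c::t) then PySem.Chars.count.go sub fuel ((c::t).drop sub.length) (acc+1)
      else PySem.Chars.count.go sub fuel t acc := rfl

theorem pvGo_mono (sub : List Char) : ∀ (fuel : Nat) (l : List Char) (acc : Nat),
    acc ≤ PySem.Chars.count.go sub fuel l acc := by
  intro fuel
  induction fuel with
  | zero => intro l acc; rw [pvGo_zero]
  | succ fuel ih =>
    intro l acc
    cases l with
    | nil => rw [pvGo_nil]
    | cons c t =>
      rw [pvGo_succ_cons]
      split
      · exact le_trans (Nat.le_succ acc) (ih _ _)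
      · exact ih _ _

theorem pvGo_of_occ (sub : List Char) (hs : sub ≠ []) : ∀ (fuel : Nat) (l : List Char) (acc p : Nat),
    l.length ≤ fuel → sub <+: l.drop p → acc + 1 ≤ PySem.Chars.count.go sub fuel l acc := by
  intro fuel
  induction fuel with
  | zero =>
    intro l acc p hlen hocc
    interval_cases hl : l.length
    · rw [List.length_eq_zero_iff] at hl; subst hl
      simp only [List.drop_nil] at hocc
      exact absurd (List.prefix_nil.mp hocc) hs
  | succ fuel ih =>
    intro l acc p hlen hocc
    cases l with
    | nil =>
      simp only [List.drop_nil] at hocc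
      exact absurd (List.prefix_nil.mp hocc) hs
    | cons c t =>
      rw [pvGo_succ_cons]
      split
      · exact le_trans (Nat.succ_le_succ (Nat.le_refl acc)) (pvGo_mono _ _ _ _)
      · rename_i hnp
        cases p with
        | zero =>
          simp only [List.drop_zero] at hocc
          exact absurd (List.isPrefixOf_iff_prefix.mpr hocc) (by simpa using hnp)
        | succ p' =>
          have : (c :: t).drop (p' + 1) = t.drop p' := rfl
          rw [this] at hocc
          exact ih t acc p' (by simpa using Nat.lt_succ_iff.mp (Nat.lt_of_lt_of_le (by simp) hlen)) hocc

theorem pvGo_of_occ2 (sub : List Char) (hs : sub ≠ []) : ∀ (fuel : Nat) (l : List Char) (acc p q : Nat),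
    l.length ≤ fuel → p + sub.length ≤ q → sub <+: l.drop p → sub <+: l.drop q →
    acc + 2 ≤ PySem.Chars.count.go sub fuel l acc := by
  intro fuel
  induction fuel with
  | zero =>
    intro l acc p q hlen _ hp _
    have hl : l = [] := List.length_eq_zero_iff.mp (Nat.le_zero.mp hlen)
    subst hl
    simp only [List.drop_nil] at hp
    exact absurd (List.prefix_nil.mp hp) hs
  | succ fuel ih =>
    intro l acc p q hlen hpq hp hq
    cases l with
    | nil =>
      simp only [List.drop_nil] at hp
      exact absurd (List.prefix_nil.mp hp) hs
    | cons c t =>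
      rw [pvGo_succ_cons]
      have hslen : 1 ≤ sub.length := by
        cases sub with
        | nil => exact absurd rfl hs
        | cons _ _ => simp
      split
      · -- sub is a prefix here: one more occurrence remains, at q - sub.length in the dropped list
        have hq' : sub <+: ((c :: t).drop sub.length).drop (q - sub.length) := by
          rw [List.drop_drop]
          have : sub.length + (q - sub.length) = q := by omega
          rw [this]; exact hq
        have hflen : ((c :: t).drop sub.length).length ≤ fuel := by
          simp only [List.length_drop, List.length_cons] at *
          omega
        exact pvGo_of_occ sub hs fuel _ (acc + 1) (q - sub.length) hflen hq'
      · rename_i hnp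
        cases p with
        | zero =>
          simp only [List.drop_zero] at hp
          exact absurd (List.isPrefixOf_iff_prefix.mpr hp) (by simpa using hnp)
        | succ p' =>
          cases q with
          | zero => omega
          | succ q' =>
            have e1 : (c :: t).drop (p' + 1) = t.drop p' := rfl
            have e2 : (c :: t).drop (q' + 1) = t.drop q' := rfl
            rw [e1] at hp; rw [e2] at hq
            exact ih t acc p' q' (by simpa using Nat.lt_succ_iff.mp (Nat.lt_of_lt_of_le (by simp) hlen)) (by omega) hp hq

theorem pvGo_exists_occ (sub : List Char) : ∀ (fuel : Nat) (l : List Char) (acc : Nat),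
    acc + 1 ≤ PySem.Chars.count.go sub fuel l acc → ∃ p, sub <+: l.drop p := by
  intro fuel
  induction fuel with
  | zero => intro l acc h; rw [pvGo_zero] at h; omega
  | succ fuel ih =>
    intro l acc h
    cases l with
    | nil => rw [pvGo_nil] at h; omega
    | cons c t =>
      rw [pvGo_succ_cons] at h
      split at h
      · rename_i hpre
        exact ⟨0, by simpa using List.isPrefixOf_iff_prefix.mp hpre⟩
      · obtain ⟨p, hp⟩ := ih t acc h
        exact ⟨p + 1, hp⟩

theorem pvGo_exists_occ2 (sub : List Char) : ∀ (fuel : Nat) (l : List Char) (acc : Nat),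
    acc + 2 ≤ PySem.Chars.count.go sub fuel l acc →
    ∃ p q, p + sub.length ≤ q ∧ sub <+: l.drop p ∧ sub <+: l.drop q := by
  intro fuel
  induction fuel with
  | zero => intro l acc h; rw [pvGo_zero] at h; omega
  | succ fuel ih =>
    intro l acc h
    cases l with
    | nil => rw [pvGo_nil] at h; omega
    | cons c t =>
      rw [pvGo_succ_cons] at h
      split at h
      · rename_i hpre
        obtain ⟨p, hp⟩ := pvGo_exists_occ sub fuel _ (acc + 1) h
        refine ⟨0, sub.length + p, by omega, by simpa using List.isPrefixOf_iff_prefix.mp hpre, ?_⟩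
        rw [← List.drop_drop]
        exact hp
      · obtain ⟨p, q, hpq, hp, hq⟩ := ih t acc h
        exact ⟨p + 1, q + 1, by omega, hp, hq⟩

-- count s sub >= 2 names exactly two non-overlapping occurrences
theorem pvCount_two_iff (s sub : List Char) (hs : sub ≠ []) :
    2 ≤ PySem.Chars.count s sub ↔
      ∃ p q, p + sub.length ≤ q ∧ sub <+: s.drop p ∧ sub <+: s.drop q := by
  have hne : sub.isEmpty = false := by cases sub with | nil => exact absurd rfl hs | cons _ _ => rfl
  rw [show PySem.Chars.count s sub = PySem.Chars.count.go sub s.length s 0 by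
    simp [PySem.Chars.count, hne]]
  constructor
  · intro h; exact pvGo_exists_occ2 sub s.length s 0 h
  · rintro ⟨p, q, hpq, hp, hq⟩
    exact pvGo_of_occ2 sub hs s.length s 0 p q (le_refl _) hpq hp hq

-- the two-letter block at p, as an explicit pair list
theorem pvBigram_eq (L : List Char) (p : Nat) (h : p + 2 ≤ L.length) :
    (L.drop p).take 2 = [L[p]'(by omega), L[p+1]'(by omega)] := by
  rw [List.drop_eq_getElem_cons (by omega), List.drop_eq_getElem_cons (by omega : p + 1 < L.length)]
  rfl

-- ===== A-side characterisation =====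
theorem pvA_iff (password : String) :
    check_repeating_pattern password = true ↔
      pvRep (PySem.Chars.lower (password.toList.filter (fun c => PySem.Chars.isalpha c))) := by
  unfold check_repeating_pattern
  set L := PySem.Chars.lower (password.toList.filter (fun c => PySem.Chars.isalpha c)) with hL
  simp only [List.any_eq_true, PySem.List.mem_pyRange_one, decide_eq_true_eq, PySem.List.len_eq]
  constructor
  · rintro ⟨length, ⟨h2, hub⟩, i, ⟨hi0, hiub⟩, hcnt⟩
    -- pattern has length length.toNat ≥ 2 and starts at i.toNat
    have hlen2 : (2:Int) ≤ length := h2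
    have hpat : PySem.Chars.slice L (some i) (some (i + length)) = (L.drop i.toNat).take length.toNat := by
      simp only [PySem.Chars.slice_eq_listSlice]
      rw [PySem.List.slice_toNat (xs := L) (a := i) (b := i + length) hi0 (by omega)]
      congr 1
      omega
    rw [hpat] at hcnt
    set sub := (L.drop i.toNat).take length.toNat with hsub
    have hsublen : sub.length = length.toNat := by
      rw [hsub]
      simp only [List.length_take, List.length_drop]
      omega
    have hsubne : sub ≠ [] := by
      intro hnil
      rw [hnil] at hsublen
      simp at hsublen
      omega
    obtain ⟨p, q, hpq, hp, hq⟩ := (pvCount_two_iff L sub hsubne).mp hcnt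
    have h2le : 2 ≤ sub.length := by omega
    have hqlen : q + 2 ≤ L.length := by
      have := hq.length_le
      simp only [List.length_drop] at this
      omega
    -- occurrences give equal bigrams at p and q
    obtain ⟨tp, htp⟩ := hp
    obtain ⟨tq, htq⟩ := hq
    refine ⟨p, q, by omega, hqlen, ?_⟩
    rw [← htp, ← htq, List.take_append_of_le_length h2le, List.take_append_of_le_length h2le]
  · rintro ⟨p, q, hpq, hq2, hbgeq⟩
    have hn4 : 4 ≤ L.length := by omega
    refine ⟨2, ⟨le_refl _, ?_⟩, (p:Int), ⟨by positivity, by omega⟩, ?_⟩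
    · have : PySem.Int.floordiv (L.length : Int) 2 = ((L.length / 2 : Nat) : Int) :=
        PySem.Int.floordiv_natCast L.length 2
      rw [this]
      have : 2 ≤ L.length / 2 := by omega
      push_cast
      omega
    · have hpat : PySem.Chars.slice L (some (p:Int)) (some ((p:Int) + 2)) = (L.drop p).take 2 := by
        simp only [PySem.Chars.slice_eq_listSlice]
        have : ((p:Int) + 2) = (((p + 2 : Nat)) : Int) := by push_cast; ring
        rw [this, PySem.List.slice_natCast]
        congr 1
        omega
      rw [hpat]
      have hsublen : ((L.drop p).take 2).length = 2 := by
        simp only [List.length_take, List.length_drop]; omega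
      apply (pvCount_two_iff L _ (by intro h; rw [h] at hsublen; simp at hsublen)).mpr
      refine ⟨p, q, by omega, List.take_prefix _ _, ?_⟩
      rw [hbgeq]; exact List.take_prefix _ _

-- ===== B-side characterisation =====
-- pvScanL: the same loop after the isalpha filter and lowering have been fused out
def pvScanL (seen : PySem.Set (Char × Char)) (prev : Option Char)
    (p2 p1 : Option (Char × Char)) : List Char → Bool
  | [] => false
  | c :: rest =>
    match prev with
    | some b =>
      let cur := (b, c)
      (match p2 with
       | some bg =>
         let seen' := PySem.Set.add seen bg
         if PySem.Set.contains seen' cur then true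
         else pvScanL seen' (some c) p1 (some cur) rest
       | none => pvScanL seen (some c) p1 (some cur) rest)
    | none => pvScanL seen (some c) p2 p1 rest

theorem pvScan_eq_scanL : ∀ (cs : List Char) (seen : PySem.Set (Char × Char))
    (prev : Option Char) (p2 p1 : Option (Char × Char)),
    pvScan seen prev p2 p1 cs =
      pvScanL seen prev p2 p1 ((cs.filter (fun c => PySem.Chars.isalpha c)).map PySem.Chars.lowerChar) := by
  intro cs
  induction cs with
  | nil => intro seen prev p2 p1; rfl
  | cons c rest ih =>
    intro seen prev p2 p1
    by_cases h : PySem.Chars.isalpha c = true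
    · rw [show List.filter (fun c => PySem.Chars.isalpha c) (c :: rest)
          = c :: List.filter (fun c => PySem.Chars.isalpha c) rest by simp [h]]
      rw [List.map_cons]
      cases prev with
      | none => simp only [pvScan, pvScanL, h, if_true]; exact ih _ _ _ _
      | some b =>
        cases p2 with
        | none => simp only [pvScan, pvScanL, h, if_true]; exact ih _ _ _ _
        | some bg =>
          simp only [pvScan, pvScanL, h, if_true]
          split <;> first | rfl | exact ih _ _ _ _
    · rw [show List.filter (fun c => PySem.Chars.isalpha c) (c :: rest)
          = List.filter (fun c => PySem.Chars.isalpha c) rest by simp [h]]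
      simp only [pvScan, h, if_false, Bool.false_eq_true]
      exact ih _ _ _ _

theorem pvScanL_iff (L : List Char) : ∀ (m t : Nat) (seen : PySem.Set (Char × Char))
    (prev : Option Char) (p2 p1 : Option (Char × Char)),
    L.length - t ≤ m → t ≤ L.length →
    prev = (if 1 ≤ t then some L[t-1]! else none) →
    p1 = (if 2 ≤ t then some (L[t-2]!, L[t-1]!) else none) →
    p2 = (if 3 ≤ t then some (L[t-3]!, L[t-2]!) else none) →
    (∀ x, x ∈ seen ↔ ∃ f, f + 4 ≤ t ∧ (L[f]!, L[f+1]!) = x) →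
    (pvScanL seen prev p2 p1 (L.drop t) = true ↔
      ∃ q, t ≤ q + 1 ∧ q + 2 ≤ L.length ∧ ∃ f, f + 2 ≤ q ∧ (L[f]!, L[f+1]!) = (L[q]!, L[q+1]!)) := by
  intro m
  induction m with
  | zero =>
    intro t seen prev p2 p1 hm ht _ _ _ _
    have hte : t = L.length := by omega
    rw [hte, List.drop_length]
    simp only [pvScanL]
    constructor
    · intro h; exact absurd h (by simp)
    · rintro ⟨q, hq1, hq2, _⟩; omega
  | succ m ih =>
    intro t seen prev p2 p1 hm ht hprev hp1 hp2 hinv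
    by_cases htl : t < L.length
    · have hdrop : L.drop t = L[t] :: L.drop (t + 1) := List.drop_eq_getElem_cons htl
      have hbang : L[t]! = L[t] := getElem!_pos L t htl
      rw [hdrop]
      rcases Nat.lt_or_ge t 1 with ht0 | ht1
      · -- t = 0
        have hte : t = 0 := by omega
        subst hte
        rw [hprev]
        simp only [show ¬ (1:Nat) ≤ 0 by omega, if_false]
        rw [show pvScanL seen none p2 p1 (L[0] :: L.drop 1)
            = pvScanL seen (some L[0]) p2 p1 (L.drop 1) from rfl]
        rw [ih 1 seen _ p2 p1 (by omega) (by omega)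
          (by simp [hbang]) (by rw [hp1]; simp) (by rw [hp2]; simp)
          (by intro x; rw [hinv x]; constructor
              · rintro ⟨f, hf, he⟩; exact ⟨f, by omega, he⟩
              · rintro ⟨f, hf, he⟩; omega)]
        constructor
        · rintro ⟨q, h1, h2, hf⟩; exact ⟨q, by omega, h2, hf⟩
        · rintro ⟨q, h1, h2, hf⟩; exact ⟨q, by omega, h2, hf⟩
      · rcases Nat.lt_or_ge t 3 with ht3 | hge3
        · -- t = 1 or t = 2 : prev is set, p2 is still none
          have hp2' : p2 = none := by rw [hp2]; simp [show ¬ 3 ≤ t by omega]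
          rw [hprev, if_pos ht1, hp2']
          rw [show pvScanL seen (some L[t-1]!) none p1 (L[t] :: L.drop (t+1))
              = pvScanL seen (some L[t]) p1 (some (L[t-1]!, L[t])) (L.drop (t+1)) from rfl]
          rw [ih (t+1) seen _ p1 _ (by omega) (by omega)
            (by simp [show 1 ≤ t + 1 by omega, show t + 1 - 1 = t from rfl, hbang])
            (by simp [show 2 ≤ t + 1 by omega, show t + 1 - 2 = t - 1 by omega,
                  show t + 1 - 1 = t from rfl, hbang])
            (by rw [hp1]
                rcases Nat.lt_or_ge t 2 with h2 | h2
                · simp [show ¬ 2 ≤ t by omega, show ¬ 3 ≤ t + 1 by omega]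
                · simp [show 2 ≤ t by omega, show 3 ≤ t + 1 by omega,
                    show t + 1 - 3 = t - 2 by omega, show t + 1 - 2 = t - 1 by omega])
            (by intro x; rw [hinv x]; constructor
                · rintro ⟨f, hf, he⟩; exact ⟨f, by omega, he⟩
                · rintro ⟨f, hf, he⟩
                  exfalso; omega)]
          constructor
          · rintro ⟨q, h1, h2, f, hf, he⟩; exact ⟨q, by omega, h2, f, hf, he⟩
          · rintro ⟨q, h1, h2, f, hf, he⟩; exact ⟨q, by omega, h2, f, hf, he⟩
        · -- t ≥ 3 : full state; add p2's bigram, test the current bigram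
          rw [hprev, if_pos (by omega : 1 ≤ t), hp2, if_pos hge3]
          rw [show pvScanL seen (some L[t-1]!) (some (L[t-3]!, L[t-2]!)) p1 (L[t] :: L.drop (t+1))
              = (let seen' := PySem.Set.add seen (L[t-3]!, L[t-2]!);
                 if PySem.Set.contains seen' (L[t-1]!, L[t]) then true
                 else pvScanL seen' (some L[t]) p1 (some (L[t-1]!, L[t])) (L.drop (t+1))) from rfl]
          have hinv' : ∀ x, x ∈ PySem.Set.add seen (L[t-3]!, L[t-2]!) ↔
              ∃ f, f + 4 ≤ t + 1 ∧ (L[f]!, L[f+1]!) = x := by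
            intro x
            rw [PySem.Set.mem_add, hinv x]
            constructor
            · rintro (⟨f, hf, he⟩ | he)
              · exact ⟨f, by omega, he⟩
              · exact ⟨t - 3, by omega, by rw [show t - 3 + 1 = t - 2 by omega, he]⟩

            · rintro ⟨f, hf, he⟩
              rcases Nat.lt_or_ge (f + 4) (t + 1) with h4 | h4
              · exact Or.inl ⟨f, by omega, he⟩
              · have : f = t - 3 := by omega
                subst this
                rw [show t - 3 + 1 = t - 2 by omega] at he
                exact Or.inr he.symm
          by_cases hc : PySem.Set.contains (PySem.Set.add seen (L[t-3]!, L[t-2]!)) (L[t-1]!, L[t]) = true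
          · rw [if_pos hc]
            refine ⟨fun _ => ?_, fun _ => rfl⟩
            have hmem : (L[t-1]!, L[t]) ∈ PySem.Set.add seen (L[t-3]!, L[t-2]!) := by simpa using hc
            obtain ⟨f, hf, he⟩ := (hinv' _).mp hmem
            refine ⟨t - 1, by omega, by omega, f, by omega, ?_⟩
            rw [he, show t - 1 + 1 = t by omega, hbang]
          · rw [if_neg (by simpa using hc)]
            rw [ih (t+1) _ _ p1 _ (by omega) (by omega)
              (by simp [show 1 ≤ t + 1 by omega, show t + 1 - 1 = t from rfl, hbang])
              (by simp [show 2 ≤ t + 1 by omega, show t + 1 - 2 = t - 1 by omega,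
                    show t + 1 - 1 = t from rfl, hbang])
              (by rw [hp1]; simp [show 2 ≤ t by omega, show 3 ≤ t + 1 by omega,
                    show t + 1 - 3 = t - 2 by omega, show t + 1 - 2 = t - 1 by omega])
              hinv']
            constructor
            · rintro ⟨q, h1, h2, f, hf, he⟩; exact ⟨q, by omega, h2, f, hf, he⟩
            · rintro ⟨q, h1, h2, f, hf, he⟩
              refine ⟨q, ?_, h2, f, hf, he⟩
              rcases Nat.lt_or_ge q (t + 1 - 1) with hlt | hge
              · exfalso
                have hq : q = t - 1 := by omega
                subst hq
                apply hc
                have hmem : (L[t-1]!, L[t]) ∈ PySem.Set.add seen (L[t-3]!, L[t-2]!) := by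
                  apply (hinv' _).mpr
                  refine ⟨f, by omega, ?_⟩
                  rw [he, show t - 1 + 1 = t by omega, hbang]
                simpa using hmem
              · omega
    · have hte : t = L.length := by omega
      rw [hte, List.drop_length]
      simp only [pvScanL]
      constructor
      · intro h; exact absurd h (by simp)
      · rintro ⟨q, hq1, hq2, _⟩; omega

theorem pvB_iff (password : String) :
    check_repeating_pattern_alt password = true ↔
      pvRep (PySem.Chars.lower (password.toList.filter (fun c => PySem.Chars.isalpha c))) := by
  unfold check_repeating_pattern_alt
  rw [pvScan_eq_scanL]
  set L := PySem.Chars.lower (password.toList.filter (fun c => PySem.Chars.isalpha c)) with hL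
  rw [show ((password.toList.filter (fun c => PySem.Chars.isalpha c)).map PySem.Chars.lowerChar) = L from rfl]
  rw [show L = L.drop 0 by rw [List.drop_zero]]
  rw [pvScanL_iff L L.length 0 PySem.Set.empty none none none (by omega) (by omega)
    (by simp) (by simp) (by simp)
    (by intro x; constructor
        · intro h; exact absurd h (by simp [PySem.Set.empty])
        · rintro ⟨f, hf, _⟩; omega)]
  rw [List.drop_zero]
  constructor
  · rintro ⟨q, _, hq2, f, hf, he⟩
    refine ⟨f, q, hf, hq2, ?_⟩
    rw [pvBigram_eq L f (by omega), pvBigram_eq L q (by omega)]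
    rw [getElem!_pos L f (by omega), getElem!_pos L (f+1) (by omega),
        getElem!_pos L q (by omega), getElem!_pos L (q+1) (by omega)] at he
    simp only [Prod.mk.injEq] at he
    rw [he.1, he.2]
  · rintro ⟨p, q, hpq, hq2, hbge⟩
    refine ⟨q, by omega, hq2, p, hpq, ?_⟩
    rw [pvBigram_eq L p (by omega), pvBigram_eq L q hq2] at hbge
    simp only [List.cons.injEq] at hbge
    rw [getElem!_pos L p (by omega), getElem!_pos L (p+1) (by omega),
        getElem!_pos L q (by omega), getElem!_pos L (q+1) (by omega)]
    simp [hbge.1, hbge.2.1]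

-- ===== VERDICT (by name: the statement is the Claim_ definition above) =====
theorem check_repeating_pattern_spec : Claim_equal_check_repeating_pattern := by
  intro password _
  unfold Spec_check_repeating_pattern
  by_cases h : pvRep (PySem.Chars.lower (password.toList.filter (fun c => PySem.Chars.isalpha c)))
  · rw [(pvA_iff password).mpr h, (pvB_iff password).mpr h]
  · rw [Bool.eq_iff_iff, pvA_iff, pvB_iff]
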